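-- pv_equiv track=rewrite | github.com/skondrashov/thisminute | src/who.py | _human_interest_from_title
-- ===== SOURCE A (Python) =====
-- def _human_interest_from_title(title):
--     """Estimate human interest from title context."""
--     title_lower = title.lower()
--     if any(d in title_lower for d in ["ebola", "marburg", "plague"]):
--         return 7
--     if any(d in title_lower for d in ["avian influenza", "cholera", "mers"]):
--         return 6
--     if any(d in title_lower for d in ["mpox", "measles", "dengue"]):
--         return 5
--     return 4
-- ===== SOURCE B (Python) =====
-- _DISEASE_SCORES = {
--     "ebola": 7, "marburg": 7, "plague": 7,
--     "avian influenza": 6, "cholera": 6, "mers": 6,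
--     "mpox": 5, "measles": 5, "dengue": 5,
-- }
--
-- def _human_interest_from_title(title):
--     """Estimate human interest from title context."""
--     title_lower = title.lower()
--     best = 4
--     for keyword, score in _DISEASE_SCORES.items():
--         if keyword in title_lower:
--             best = max(best, score)
--     return best
-- ===== Notes on version B (the rewrite author's own statement) =====
-- stated objective: simpler
-- what changed: Replaced the three ordered short-circuit any()-branches by a single max-accumulating pass over one flat keyword-to-score dict with floor 4.
import Mathlib
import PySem

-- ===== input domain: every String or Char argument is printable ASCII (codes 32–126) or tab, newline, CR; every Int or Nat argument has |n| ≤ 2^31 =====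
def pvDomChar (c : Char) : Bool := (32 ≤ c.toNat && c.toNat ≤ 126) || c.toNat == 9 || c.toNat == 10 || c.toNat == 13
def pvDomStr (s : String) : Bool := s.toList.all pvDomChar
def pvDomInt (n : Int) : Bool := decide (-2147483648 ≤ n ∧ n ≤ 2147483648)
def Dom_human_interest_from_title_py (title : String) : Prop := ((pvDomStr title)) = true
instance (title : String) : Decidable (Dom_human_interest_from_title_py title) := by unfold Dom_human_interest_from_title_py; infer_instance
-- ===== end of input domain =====

-- B replaces A's three ordered short-circuit branches by one max-accumulating pass
-- over a flat keyword→score table (objective: simpler).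


-- ===== PORT A =====
def human_interest_from_title_py (title : String) : Int :=
  let title_lower := PySem.Str.lower title
  if (["ebola", "marburg", "plague"]).any (fun d => PySem.Str.isIn d title_lower) then 7
  else if (["avian influenza", "cholera", "mers"]).any (fun d => PySem.Str.isIn d title_lower) then 6
  else if (["mpox", "measles", "dengue"]).any (fun d => PySem.Str.isIn d title_lower) then 5
  else 4

-- ===== PORT B =====
def pvDiseaseScores : List (String × Int) :=
  [("ebola", 7), ("marburg", 7), ("plague", 7),
   ("avian influenza", 6), ("cholera", 6), ("mers", 6),
   ("mpox", 5), ("measles", 5), ("dengue", 5)]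

def human_interest_from_title_py_alt (title : String) : Int :=
  let title_lower := PySem.Str.lower title
  pvDiseaseScores.foldl
    (fun best kv => if PySem.Str.isIn kv.1 title_lower then max best kv.2 else best) 4

-- ===== PRECONDITION & SPEC =====
def Spec_human_interest_from_title_py (title : String) (out : Int) : Prop := out = human_interest_from_title_py_alt title
instance (title : String) (out : Int) : Decidable (Spec_human_interest_from_title_py title out) := by unfold Spec_human_interest_from_title_py; infer_instance

-- ===== CLAIM (what is proved, stated in full; the proofs are below) =====
def Claim_equal_human_interest_from_title_py : Prop := ∀ (title : String), Dom_human_interest_from_title_py title → Spec_human_interest_from_title_py title (human_interest_from_title_py title)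

-- ===== LEMMAS AND PROOFS =====

-- ===== VERDICT (by name: the statement is the Claim_ definition above) =====
theorem human_interest_from_title_py_spec : Claim_equal_human_interest_from_title_py := by
  intro title _
  unfold Spec_human_interest_from_title_py human_interest_from_title_py human_interest_from_title_py_alt pvDiseaseScores
  simp only [List.any_cons, List.any_nil, List.foldl_cons, List.foldl_nil, Bool.or_false]
  generalize PySem.Str.isIn "ebola" (PySem.Str.lower title) = b1
  generalize PySem.Str.isIn "marburg" (PySem.Str.lower title) = b2
  generalize PySem.Str.isIn "plague" (PySem.Str.lower title) = b3
  generalize PySem.Str.isIn "avian influenza" (PySem.Str.lower title) = b4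
  generalize PySem.Str.isIn "cholera" (PySem.Str.lower title) = b5
  generalize PySem.Str.isIn "mers" (PySem.Str.lower title) = b6
  generalize PySem.Str.isIn "mpox" (PySem.Str.lower title) = b7
  generalize PySem.Str.isIn "measles" (PySem.Str.lower title) = b8
  generalize PySem.Str.isIn "dengue" (PySem.Str.lower title) = b9
  revert b1 b2 b3 b4 b5 b6 b7 b8 b9
  decide
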